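-- pv_equiv track=rewrite | github.com/AdamZhouSE/pythonHomework | Code/CodeRecords/2206/60700/240427.py | func
-- ===== SOURCE A (Python) =====
-- def func(n):
--     if n == 1:
--         return 1
--     else:
--         x = n*(n+1)//2
--         c = 1
--         for i in range(n):
--             c *= x
--             x -= 1
--         return c + func(n-1)
-- ===== SOURCE B (Python) =====
-- def func(n):
--     total = 1
--     for m in range(2, n + 1):
--         x = m * (m + 1) // 2
--         term = 1
--         for i in range(m):
--             term *= x
--             x -= 1
--         total += term
--     return total
-- ===== Notes on version B (the rewrite author's own statement) =====
-- stated objective: simpler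
-- what changed: Replaces the recursion over n with a single explicit loop m = 2..n accumulating each falling-factorial term into a running total (base term 1 included as the initial total).
import Mathlib
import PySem

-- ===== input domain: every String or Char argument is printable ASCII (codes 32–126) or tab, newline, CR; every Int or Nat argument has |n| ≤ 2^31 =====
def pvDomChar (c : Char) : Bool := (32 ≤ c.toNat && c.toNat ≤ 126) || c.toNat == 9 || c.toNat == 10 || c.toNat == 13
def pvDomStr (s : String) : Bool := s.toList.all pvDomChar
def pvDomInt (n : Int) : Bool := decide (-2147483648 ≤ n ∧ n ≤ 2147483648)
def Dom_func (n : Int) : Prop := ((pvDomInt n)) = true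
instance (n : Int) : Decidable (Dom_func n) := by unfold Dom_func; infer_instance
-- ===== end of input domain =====

-- B replaces A's recursion with one explicit accumulating loop m = 2..n (simpler); Pre_ restricts to n ≥ 1, where A returns.


-- ===== PORT A =====
-- A is recursive on an Int; ported with fuel n.toNat (enough for every n admitted by Pre_func;
-- fuel exhaustion only happens outside Pre_func, where the Python raises RecursionError).
def funcGo (fuel : Nat) (n : Int) : Int :=
  match fuel with
  | 0 => 0
  | fuel + 1 =>
    if n == 1 then 1
    else
      let x := PySem.Int.floordiv (n * (n + 1)) 2
      let p := (PySem.List.pyRange 0 n 1).foldl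
        (fun (s : Int × Int) _ => (s.1 * s.2, s.2 - 1)) (1, x)
      p.1 + funcGo fuel (n - 1)

def func (n : Int) : Int := funcGo n.toNat n

-- ===== PORT B =====
def func_alt (n : Int) : Int :=
  (PySem.List.pyRange 2 (n + 1) 1).foldl
    (fun (total : Int) (m : Int) =>
      let x := PySem.Int.floordiv (m * (m + 1)) 2
      let p := (PySem.List.pyRange 0 m 1).foldl
        (fun (s : Int × Int) _ => (s.1 * s.2, s.2 - 1)) (1, x)
      total + p.1)
    1

-- ===== PRECONDITION & SPEC =====
-- Pre_: the Python A recurses past its base case and raises RecursionError for every n ≤ 0.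
def Pre_func (n : Int) : Prop := 1 ≤ n
instance (n : Int) : Decidable (Pre_func n) := by unfold Pre_func; infer_instance
def pvWitness_func : Int := (3)

def Spec_func (n : Int) (out : Int) : Prop := out = func_alt n
instance (n : Int) (out : Int) : Decidable (Spec_func n out) := by unfold Spec_func; infer_instance

-- ===== CLAIM (what is proved, stated in full; the proofs are below) =====
def Claim_equal_func : Prop := ∀ (n : Int), Dom_func n → Pre_func n → Spec_func n (func n)

-- ===== LEMMAS AND PROOFS =====

-- the m-th term (falling factorial of the m-th triangular number), as both ports compute it
def pvTerm (m : Int) : Int :=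
  ((PySem.List.pyRange 0 m 1).foldl
    (fun (s : Int × Int) _ => (s.1 * s.2, s.2 - 1))
    (1, PySem.Int.floordiv (m * (m + 1)) 2)).1

theorem func_alt_one : func_alt 1 = 1 := by
  unfold func_alt
  rw [PySem.List.pyRange_one_eq_nil (by norm_num)]
  rfl

theorem func_alt_step (n : Int) (h : 2 ≤ n) : func_alt n = func_alt (n - 1) + pvTerm n := by
  unfold func_alt pvTerm
  rw [PySem.List.pyRange_one_succ_right (by omega : (2 : Int) ≤ n), List.foldl_append,
    show n - 1 + 1 = n from by ring]
  simp [List.foldl_cons, List.foldl_nil]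

theorem funcGo_eq (k : Nat) : ∀ (n : Int), 1 ≤ n → n.toNat = k → funcGo k n = func_alt n := by
  induction k with
  | zero => intro n h1 hk; omega
  | succ k ih =>
    intro n h1 hk
    by_cases hone : n = 1
    · subst hone
      simp [funcGo, func_alt_one]
    · have h2 : 2 ≤ n := by omega
      have hrec : funcGo (k + 1) n = pvTerm n + funcGo k (n - 1) := by
        rw [show funcGo (k + 1) n
              = if (n == 1) = true then 1 else pvTerm n + funcGo k (n - 1) from rfl,
          if_neg (by simp [hone])]
      rw [hrec, ih (n - 1) (by omega) (by omega), func_alt_step n h2]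
      ring

-- ===== VERDICT (by name: the statement is the Claim_ definition above) =====
theorem func_spec : Claim_equal_func := by
  intro n _ hpre
  unfold Spec_func func
  exact funcGo_eq n.toNat n hpre rfl
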